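-- pv_equiv track=rewrite | github.com/ponty/abandi | abandi/plugins/scummvm.py | extractGameMap
-- ===== SOURCE A (Python) =====
-- def extractGameMap(sysout):
--     lines = sysout.splitlines()
--
--     map = dict()
--     start = 0
--     for line in lines:
--         ls = line.partition(' ')
--         if "---" in ls[0]:
--             start = 1
--         elif start:
--             map[ls[2].strip()] = ls[0].strip()
--     return map
-- ===== SOURCE B (Python) =====
-- def extractGameMap(sysout):
--     # Reverse traversal: entries collected bottom-up stay "pending" until a
--     # header separator line above them confirms the whole block; the dict is
--     # built once from the confirmed pairs in original order.
--     confirmed = []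
--     pending = []
--     for line in reversed(sysout.splitlines()):
--         head, _, tail = line.partition(' ')
--         if "---" in head:
--             confirmed += pending
--             pending = []
--         else:
--             pending.append((tail.strip(), head.strip()))
--     confirmed.reverse()
--     return dict(confirmed)
-- ===== Notes on version B (the rewrite author's own statement) =====
-- stated objective: alternative
-- what changed: Instead of A's forward loop with a start flag inserting into the dict as it goes, B traverses the lines in reverse, accumulating entries into a pending block that is confirmed when a header separator line above it is reached, then builds the dict once from the reversed confirmed pair list.
import Mathlib
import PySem

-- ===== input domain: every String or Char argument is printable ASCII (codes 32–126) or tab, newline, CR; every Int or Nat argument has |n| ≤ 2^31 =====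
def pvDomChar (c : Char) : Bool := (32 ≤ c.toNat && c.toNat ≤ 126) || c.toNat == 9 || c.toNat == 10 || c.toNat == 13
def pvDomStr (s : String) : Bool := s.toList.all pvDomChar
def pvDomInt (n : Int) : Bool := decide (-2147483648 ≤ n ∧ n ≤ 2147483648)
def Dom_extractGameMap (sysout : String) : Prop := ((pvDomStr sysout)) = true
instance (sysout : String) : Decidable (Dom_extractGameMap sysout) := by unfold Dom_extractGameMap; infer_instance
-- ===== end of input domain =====

-- B replaces A's forward loop-with-flag by a reverse traversal with a pending/confirmed
-- block accumulator, building the dict once at the end; same O(n) cost (objective: alternative).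

-- line.partition(' ') restricted to the components the code uses: (before, after) around the
-- FIRST ' ' (or (line, '') when absent) — exact for the single-character separator ' '.
def pvPartSp : List Char → List Char × List Char
  | [] => ([], [])
  | c :: rest =>
      if c = ' ' then ([], rest)
      else
        let p := pvPartSp rest
        (c :: p.1, p.2)

-- "---" in line.partition(' ')[0]
def pvHdr (line : String) : Bool :=
  PySem.Chars.isIn "---".toList (pvPartSp line.toList).1

-- (ls[2].strip(), ls[0].strip())
def pvEntry (line : String) : String × String :=
  let p := pvPartSp line.toList
  (String.ofList (PySem.Chars.strip p.2), String.ofList (PySem.Chars.strip p.1))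

-- ===== PORT A =====
-- A's loop body: state = (map, start)
def pvStepA (st : PySem.Dict String String × Nat) (line : String) :
    PySem.Dict String String × Nat :=
  if pvHdr line then (st.1, 1)
  else if st.2 ≠ 0 then
    (st.1.insert (pvEntry line).1 (pvEntry line).2, st.2)
  else st

def extractGameMap (sysout : String) : List (String × String) :=
  let lines := PySem.Str.splitlines sysout
  ((lines.foldl pvStepA (PySem.Dict.empty, 0)).1).items

-- ===== PORT B =====
-- B's loop body over reversed(lines): state = (confirmed, pending)
def pvStepR (st : List (String × String) × List (String × String)) (line : String) :
    List (String × String) × List (String × String) :=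
  if pvHdr line then (st.1 ++ st.2, [])
  else (st.1, st.2 ++ [pvEntry line])

-- dict(pairs): sequential insertion
def pvIns (d : PySem.Dict String String) (p : String × String) : PySem.Dict String String :=
  d.insert p.1 p.2

def extractGameMap_alt (sysout : String) : List (String × String) :=
  let lines := PySem.Str.splitlines sysout
  let st := (lines.reverse).foldl pvStepR ([], [])
  let confirmed := st.1.reverse
  (confirmed.foldl pvIns PySem.Dict.empty).items

-- ===== PRECONDITION & SPEC =====
def Spec_extractGameMap (sysout : String) (out : List (String × String)) : Prop := out = extractGameMap_alt sysout
instance (sysout : String) (out : List (String × String)) : Decidable (Spec_extractGameMap sysout out) := by unfold Spec_extractGameMap; infer_instance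

-- ===== CLAIM (what is proved, stated in full; the proofs are below) =====
def Claim_equal_extractGameMap : Prop := ∀ (sysout : String), Dom_extractGameMap sysout → Spec_extractGameMap sysout (extractGameMap sysout)

-- ===== LEMMAS AND PROOFS =====

-- entries of all non-header lines
def pvBody (xs : List String) : List (String × String) :=
  (xs.filter (fun l => !pvHdr l)).map pvEntry

-- entries of the non-header prefix (before the first header; all of xs if none)
def pvPre (xs : List String) : List (String × String) :=
  (xs.takeWhile (fun l => !pvHdr l)).map pvEntry

-- entries of the lines strictly after the first header, later headers filtered out
def pvAft : List String → List (String × String)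
  | [] => []
  | l :: r => if pvHdr l then pvBody r else pvAft r

theorem pvBody_eq (xs : List String) : pvBody xs = pvPre xs ++ pvAft xs := by
  induction xs with
  | nil => rfl
  | cons l r ih =>
      cases h : pvHdr l with
      | true => simp [pvBody, pvPre, pvAft, h, List.filter_cons, List.takeWhile]
      | false =>
          simp [pvBody, pvPre, pvAft, h, List.filter_cons, List.takeWhile] at ih ⊢
          simpa [pvBody, pvPre] using ih

-- B's reverse pass, characterised on the forward list (foldr form)
theorem pv_foldr_char (xs : List String) :
    xs.foldr (fun l st => pvStepR st l) ([], []) = ((pvAft xs).reverse, (pvPre xs).reverse) := by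
  induction xs with
  | nil => rfl
  | cons l r ih =>
      cases h : pvHdr l with
      | true =>
          rw [List.foldr_cons, ih]
          simp [pvStepR, pvAft, pvPre, h, pvBody_eq, List.takeWhile]
      | false =>
          rw [List.foldr_cons, ih]
          simp [pvStepR, pvAft, pvPre, h, List.takeWhile]

-- once started (flag = 1), A inserts exactly the pvBody entries in order
theorem pv_foldA_started (xs : List String) (d : PySem.Dict String String) :
    xs.foldl pvStepA (d, 1) = ((pvBody xs).foldl pvIns d, 1) := by
  induction xs generalizing d with
  | nil => rfl
  | cons l r ih =>
      cases h : pvHdr l with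
      | true => simp [List.foldl_cons, pvStepA, h, ih, pvBody]
      | false =>
          simp [List.foldl_cons, pvStepA, h, ih, pvBody, pvIns]

-- A's whole loop inserts exactly the pvAft entries in order
theorem pv_foldA_eq (xs : List String) (d : PySem.Dict String String) :
    (xs.foldl pvStepA (d, 0)).1 = (pvAft xs).foldl pvIns d := by
  induction xs generalizing d with
  | nil => rfl
  | cons l r ih =>
      cases h : pvHdr l with
      | true => simp [List.foldl_cons, pvStepA, h, pv_foldA_started, pvAft]
      | false => simp [List.foldl_cons, pvStepA, h, ih, pvAft]

-- ===== VERDICT (by name: the statement is the Claim_ definition above) =====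
theorem extractGameMap_spec : Claim_equal_extractGameMap := by
  intro sysout _
  simp only [Spec_extractGameMap, extractGameMap, extractGameMap_alt]
  rw [List.foldl_reverse (f := pvStepR), pv_foldr_char, pv_foldA_eq]
  simp
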